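-- pv_equiv track=rewrite | github.com/HanvHien/MIT-CS-6.. | problemset_4/nfruits.py | nfruits
-- ===== SOURCE A (Python) =====
-- def nfruits(dFruits, sConsumed):
--     """
--     dFruits -> a Dict containing type of fruit and its initial quantity
--     sConsumed -> as string pattern of the fruits eaten
--
--     returns the Max value of the different types of fruit """
--     for i in range(len(sConsumed)):
--         if sConsumed[i] in dFruits:
--                                             # consuming fruit: subtract 1 from specific fruit
--             dFruits[sConsumed[i]] -= 1
--             if i < len(sConsumed) - 1:        # has not reached campus
--                                             # buy all others
--                 for j in dFruits:
--                     if j != sConsumed[i]:   # if not consumed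
--                         dFruits[j] += 1
--     return max(dFruits.values())
-- ===== SOURCE B (Python) =====
-- def nfruits(dFruits, sConsumed):
--     # Count once per distinct consumed character that is a fruit (C-level str.count),
--     # then a closed-form value per fruit, instead of A's per-character simulation.
--     last = sConsumed[-1] if sConsumed else None
--     counts = {ch: sConsumed.count(ch) for ch in set(sConsumed) if ch in dFruits}
--     add = sum(counts.values()) - (1 if last in dFruits else 0)
--     best = None
--     for k, v in dFruits.items():
--         c = counts.get(k, 0)
--         b = c - (1 if k == last else 0)
--         val = v + add - c - b
--         if best is None or val > best:
--             best = val
--     return best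
-- ===== Notes on version B (the rewrite author's own statement) =====
-- stated objective: faster
-- what changed: Replaces the simulation that rescans the whole dict at every consumed character with one C-level sConsumed.count call per fruit and a closed-form value per fruit (v + add - c - b).
import Mathlib
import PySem

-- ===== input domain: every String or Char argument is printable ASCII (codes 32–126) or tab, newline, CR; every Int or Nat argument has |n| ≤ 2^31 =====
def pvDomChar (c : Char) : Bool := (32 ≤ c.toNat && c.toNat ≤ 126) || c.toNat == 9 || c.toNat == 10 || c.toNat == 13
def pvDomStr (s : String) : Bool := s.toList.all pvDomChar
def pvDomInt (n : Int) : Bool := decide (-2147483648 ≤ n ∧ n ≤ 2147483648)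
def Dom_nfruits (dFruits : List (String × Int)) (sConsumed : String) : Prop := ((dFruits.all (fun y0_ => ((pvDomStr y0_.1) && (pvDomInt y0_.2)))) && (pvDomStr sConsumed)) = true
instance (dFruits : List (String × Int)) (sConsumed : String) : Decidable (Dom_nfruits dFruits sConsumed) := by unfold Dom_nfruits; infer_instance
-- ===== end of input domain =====

-- B replaces A's per-character rescan of the whole dict (O(n*k)) by one counting pass over
-- sConsumed and a closed-form value per fruit, O(n+k). Equivalence is about the RETURN value
-- only: the Python A mutates the dFruits dict in place, B does not.

-- ===== PORT A =====
-- The body of A's outer loop, one iteration: p = (sConsumed[i], i).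
-- 'sConsumed[i] in dFruits' tests the 1-character string; 'for j in dFruits' iterates the
-- current keys; 'dFruits[..] -= 1' / '+= 1' are Dict.modify on a present key.
def nfruitsStep (n : Nat) (d : PySem.Dict String Int) (p : Char × Nat) : PySem.Dict String Int :=
  let key := String.mk [p.1]
  if d.contains key then
    let d1 := d.modify key 0 (fun x => x - 1)
    if p.2 < n - 1 then
      d1.keys.foldl (fun d2 j => if j ≠ key then d2.modify j 0 (fun x => x + 1) else d2) d1
    else d1
  else d

-- 'for i in range(len(sConsumed))' with 'sConsumed[i]' is ported as a fold over cs.zipIdx,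
-- the (character, index) pairs in order.
def nfruits (dFruits : List (String × Int)) (sConsumed : String) : Int :=
  let d0 := PySem.Dict.ofList dFruits
  let cs := sConsumed.toList
  let dfin := (cs.zipIdx).foldl (nfruitsStep cs.length) d0
  match PySem.List.max? dfin.values (fun x => x) with
  | some m => m
  | none => 0   -- unreachable under Pre_ (max([]) raises ValueError)

-- ===== PORT B =====
def nfruits_alt (dFruits : List (String × Int)) (sConsumed : String) : Int :=
  let d := PySem.Dict.ofList dFruits
  let last : Option String := (sConsumed.toList.getLast?).map (fun ch => String.mk [ch])
  -- set(sConsumed): the distinct consumed characters, as 1-character strings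
  let cset : PySem.Set String := PySem.Set.ofList (sConsumed.toList.map (fun ch => String.mk [ch]))
  -- counts = {ch: sConsumed.count(ch) for ch in set(sConsumed) if ch in dFruits};
  -- consumed only by order-independent sum/lookups below
  let counts := cset.foldl (fun (m : PySem.Dict String Int) t =>
      if d.contains t then m.insert t ((PySem.Str.count sConsumed t : Nat) : Int) else m) PySem.Dict.empty
  -- add = sum(counts.values()) - (1 if last in dFruits else 0); None in dict is False
  let add := (counts.values.foldl (fun (a : Int) c => a + c) 0)
             - (if (match last with | some l => d.contains l | none => false) then 1 else 0)
  let best := d.items.foldl (fun (b : Option Int) p =>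
      let c := counts.getD p.1 0   -- counts.get(k, 0)
      let bb := c - (if some p.1 = last then 1 else 0)
      let val := p.2 + add - c - bb
      match b with
      | none => some val
      | some m => if val > m then some val else some m) none
  match best with
  | some m => m
  | none => 0   -- unreachable under Pre_ (Python B returns None for an empty dict)

-- ===== PRECONDITION & SPEC =====
-- Pre_ excludes only the empty dict, on which A raises ValueError (max() of an empty sequence).
def Pre_nfruits (dFruits : List (String × Int)) (sConsumed : String) : Prop := dFruits ≠ []
instance (dFruits : List (String × Int)) (sConsumed : String) : Decidable (Pre_nfruits dFruits sConsumed) := by unfold Pre_nfruits; infer_instance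
def pvWitness_nfruits : (List (String × Int)) × String := ([("a", 3), ("b", 1)], "abz")

def Spec_nfruits (dFruits : List (String × Int)) (sConsumed : String) (out : Int) : Prop := out = nfruits_alt dFruits sConsumed
instance (dFruits : List (String × Int)) (sConsumed : String) (out : Int) : Decidable (Spec_nfruits dFruits sConsumed out) := by unfold Spec_nfruits; infer_instance

-- ===== CLAIM (what is proved, stated in full; the proofs are below) =====
def Claim_equal_nfruits : Prop := ∀ (dFruits : List (String × Int)) (sConsumed : String), Dom_nfruits dFruits sConsumed → Pre_nfruits dFruits sConsumed → Spec_nfruits dFruits sConsumed (nfruits dFruits sConsumed)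

-- ===== LEMMAS AND PROOFS =====

-- A's inner loop ('buy all others') adds 1 to every key of js other than key.
lemma pvInner_getD (key k : String) : ∀ (js : List String) (d : PySem.Dict String Int), js.Nodup →
    (js.foldl (fun d2 j => if j ≠ key then d2.modify j 0 (fun x => x + 1) else d2) d).getD k 0
      = d.getD k 0 + (if k ∈ js ∧ k ≠ key then 1 else 0) := by
  intro js
  induction js with
  | nil => intro d _; simp
  | cons j t ih =>
    intro d hnd
    rw [List.foldl_cons]
    rcases List.nodup_cons.mp hnd with ⟨hjt, hndt⟩
    by_cases hj : j ≠ key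
    · simp only [if_pos hj]
      rw [ih _ hndt, PySem.Dict.getD_modify]
      by_cases hkj : k = j
      · subst hkj
        simp [hj, hjt]
      · simp only [if_neg hkj, List.mem_cons]
        by_cases hkt : k ∈ t ∧ k ≠ key
        · simp [hkt]
        · simp only [if_neg hkt]
          have : ¬((k = j ∨ k ∈ t) ∧ k ≠ key) := by
            rintro ⟨hm, hne⟩
            rcases hm with h | h
            · exact hkj h
            · exact hkt ⟨h, hne⟩
          simp [this]
    · simp only [if_neg hj]
      push_neg at hj
      subst hj
      rw [ih _ hndt]
      by_cases hkt : k ∈ t ∧ k ≠ j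
      · have : k ∈ j :: t ∧ k ≠ j := ⟨List.mem_cons_of_mem _ hkt.1, hkt.2⟩
        simp [hkt, this]
      · simp only [if_neg hkt]
        have hkj : k = j ∨ k ∈ t → k = j := by
          rintro (h | h)
          · exact h
          · by_contra hne; exact hkt ⟨h, hne⟩
        simp only [List.mem_cons]
        by_cases hk : k = j
        · simp [hk]
        · have hnt : k ∉ t := fun h => hk (hkj (Or.inr h))
          simp [hk, hnt]

lemma pvInner_keys (key : String) : ∀ (js : List String) (d : PySem.Dict String Int), (∀ j ∈ js, j ∈ d.keys) →
    (js.foldl (fun d2 j => if j ≠ key then d2.modify j 0 (fun x => x + 1) else d2) d).keys = d.keys := by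
  intro js
  induction js with
  | nil => intro d _; simp
  | cons j t ih =>
    intro d h
    rw [List.foldl_cons]
    by_cases hj : j ≠ key
    · simp only [if_pos hj]
      have hc : d.contains j = true := (PySem.Dict.contains_iff_mem_keys d j).mpr (h j (List.mem_cons_self))
      have hkeys : (d.modify j 0 (fun x => x + 1)).keys = d.keys := by
        rw [PySem.Dict.keys_modify, PySem.Dict.keys_insert_of_contains _ _ hc]
      rw [ih _ (by intro a ha; rw [hkeys]; exact h a (List.mem_cons_of_mem _ ha)), hkeys]
    · simp only [if_neg hj]
      exact ih _ (fun a ha => h a (List.mem_cons_of_mem _ ha))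

-- The net effect of one outer-loop iteration on key k, as a weight.
def pvWgt (d : PySem.Dict String Int) (k : String) (n : Nat) (p : Char × Nat) : Int :=
  (if d.contains (String.mk [p.1]) = true ∧ k = String.mk [p.1] then -1 else 0)
  + (if p.2 < n - 1 then (if d.contains (String.mk [p.1]) = true ∧ d.contains k = true ∧ k ≠ String.mk [p.1] then 1 else 0) else 0)

lemma pvStepA_keys (n : Nat) (d : PySem.Dict String Int) (p : Char × Nat) :
    (nfruitsStep n d p).keys = d.keys := by
  unfold nfruitsStep
  by_cases hc : d.contains (String.mk [p.1]) = true
  · have hk1 : (d.modify (String.mk [p.1]) 0 (fun x => x - 1)).keys = d.keys := by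
      rw [PySem.Dict.keys_modify, PySem.Dict.keys_insert_of_contains _ _ hc]
    simp only [hc, if_true]
    by_cases hi : p.2 < n - 1
    · simp only [hi, if_true]
      rw [pvInner_keys _ _ _ (fun j hj => hj), hk1]
    · simp [hi, hk1]
  · simp [hc]

lemma pvStepA_getD (n : Nat) (d : PySem.Dict String Int) (hnd : d.keys.Nodup) (p : Char × Nat) (k : String) :
    (nfruitsStep n d p).getD k 0 = d.getD k 0 + pvWgt d k n p := by
  unfold nfruitsStep pvWgt
  by_cases hc : d.contains (String.mk [p.1]) = true
  · have hk1 : (d.modify (String.mk [p.1]) 0 (fun x => x - 1)).keys = d.keys := by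
      rw [PySem.Dict.keys_modify, PySem.Dict.keys_insert_of_contains _ _ hc]
    have hg1 : (d.modify (String.mk [p.1]) 0 (fun x => x - 1)).getD k 0
        = d.getD k 0 + (if d.contains (String.mk [p.1]) = true ∧ k = String.mk [p.1] then -1 else 0) := by
      rw [PySem.Dict.getD_modify]
      by_cases hk : k = String.mk [p.1] <;> simp [hk, hc] <;> ring
    simp only [hc, if_true, true_and]
    by_cases hi : p.2 < n - 1
    · simp only [hi, if_true]
      rw [pvInner_getD _ _ _ _ (by rw [hk1]; exact hnd), hg1, hk1]
      have hmem : k ∈ d.keys ↔ d.contains k = true := (PySem.Dict.contains_iff_mem_keys d k).symm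
      by_cases hck : d.contains k = true
      · by_cases hk : k = String.mk [p.1] <;>
          simp [hmem.mpr hck, hck, hc, hk] <;> ring
      · have hnm : k ∉ d.keys := fun h => hck (hmem.mp h)
        by_cases hk : k = String.mk [p.1] <;> simp [hnm, hck, hc, hk]
    · simp [hi, hg1, hc]
  · simp [hc]

-- The outer loop: keys never change, and each key's value moves by the sum of the weights.
lemma pvOuterA (n : Nat) : ∀ (L : List (Char × Nat)) (d : PySem.Dict String Int), d.keys.Nodup →
    (L.foldl (nfruitsStep n) d).keys = d.keys ∧
    ∀ k, (L.foldl (nfruitsStep n) d).getD k 0 = d.getD k 0 + (L.map (pvWgt d k n)).sum := by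
  intro L
  induction L with
  | nil => intro d _; simp
  | cons p t ih =>
    intro d hnd
    rw [List.foldl_cons]
    have hkeys := pvStepA_keys n d p
    have hnd' : (nfruitsStep n d p).keys.Nodup := by rw [hkeys]; exact hnd
    rcases ih (nfruitsStep n d p) hnd' with ⟨ihk, ihg⟩
    constructor
    · rw [ihk, hkeys]
    · intro k
      rw [ihg k, pvStepA_getD n d hnd p k, List.map_cons, List.sum_cons]
      have hwgt : pvWgt (nfruitsStep n d p) k n = pvWgt d k n := by
        funext q
        unfold pvWgt
        have hc : ∀ j, (nfruitsStep n d p).contains j = d.contains j := by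
          intro j
          rw [PySem.Dict.contains_eq_decide_mem_keys, PySem.Dict.contains_eq_decide_mem_keys, hkeys]
        rw [hc, hc]
      rw [hwgt]
      ring

lemma pvSum_zipIdx_lt (g : Char → Int) : ∀ (xs : List Char) (s m : Nat), s + xs.length ≤ m →
    ((xs.zipIdx s).map (fun p => if p.2 < m then g p.1 else 0)).sum = (xs.map g).sum := by
  intro xs
  induction xs with
  | nil => intro s m _; simp
  | cons x t ih =>
    intro s m h
    rw [List.zipIdx_cons, List.map_cons, List.sum_cons, List.map_cons, List.sum_cons,
      ih (s+1) m (by simpa [Nat.add_comm, Nat.add_left_comm] using h)]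
    have hs : s < m := by simp at h; omega
    simp [hs]

lemma pvSum_map_sub {α : Type} (xs : List α) (f g : α → Int) :
    (xs.map (fun x => f x - g x)).sum = (xs.map f).sum - (xs.map g).sum := by
  have h := PySem.List.sum_map_add_int xs (fun x => f x - g x) g
  have h2 : (List.map (fun x => (f x - g x) + g x) xs) = List.map f xs := by
    apply List.map_congr_left; intro a _; ring
  rw [h2] at h
  omega

lemma pvSum_map_ite_neg {α : Type} (p : α → Prop) [DecidablePred p] (xs : List α) :
    (xs.map (fun x => if p x then (-1 : Int) else 0)).sum
      = -((xs.countP (fun x => decide (p x)) : Nat) : Int) := by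
  have h := pvSum_map_sub xs (fun _ => (0:Int)) (fun x => if p x then (1:Int) else 0)
  have h2 : (List.map (fun x => (0:Int) - (if p x then (1:Int) else 0)) xs) = List.map (fun x => if p x then (-1:Int) else 0) xs := by
    apply List.map_congr_left; intro a _; split <;> ring
  rw [h2] at h
  rw [h]
  have h3 := PySem.List.sum_map_ite_one_zero (fun x => decide (p x)) xs
  simp only [decide_eq_true_eq] at h3
  simp [h3]

lemma pvSum_map_ite_one {α : Type} (p : α → Prop) [DecidablePred p] (xs : List α) :
    (xs.map (fun x => if p x then (1 : Int) else 0)).sum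
      = ((xs.countP (fun x => decide (p x)) : Nat) : Int) := by
  have h3 := PySem.List.sum_map_ite_one_zero (fun x => decide (p x)) xs
  simpa using h3

-- B's closed-form value of a fruit k after the whole pattern cs.
def pvVal (d : PySem.Dict String Int) (cs : List Char) (k : String) : Int :=
  d.getD k 0
  + ((((cs.map (fun ch => String.mk [ch])).countP (fun t => d.contains t) : Nat) : Int)
     - (match cs.getLast? with
        | some x => if d.contains (String.mk [x]) = true then (1 : Int) else 0
        | none => 0))
  - (((cs.map (fun ch => String.mk [ch])).count k : Nat) : Int)
  - ((((cs.map (fun ch => String.mk [ch])).count k : Nat) : Int)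
     - (match cs.getLast? with
        | some x => if k = String.mk [x] then (1 : Int) else 0
        | none => 0))

-- Per-key agreement: A's simulated final value of a present key equals B's closed form.
lemma pvKey (d : PySem.Dict String Int) (hnd : d.keys.Nodup) (cs : List Char) (k : String)
    (hk : d.contains k = true) :
    ((cs.zipIdx).foldl (nfruitsStep cs.length) d).getD k 0 = pvVal d cs k := by
  obtain rfl | ⟨xs, x, rfl⟩ := List.eq_nil_or_concat cs
  · simp [pvVal]
  · simp only [List.concat_eq_append]
    rw [(pvOuterA (xs ++ [x]).length ((xs ++ [x]).zipIdx) d hnd).2 k]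
    have hn1 : (xs ++ [x]).length - 1 = xs.length := by simp
    rw [show pvWgt d k (xs ++ [x]).length = (fun p : Char × Nat =>
        (if d.contains (String.mk [p.1]) = true ∧ k = String.mk [p.1] then (-1:Int) else 0)
        + (if p.2 < (xs ++ [x]).length - 1 then (if d.contains (String.mk [p.1]) = true ∧ d.contains k = true ∧ k ≠ String.mk [p.1] then (1:Int) else 0) else 0)) from rfl]
    rw [PySem.List.sum_map_add_int]
    have hpart1 : (((xs ++ [x]).zipIdx).map (fun p => if d.contains (String.mk [p.1]) = true ∧ k = String.mk [p.1] then (-1:Int) else 0)).sum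
        = ((xs ++ [x]).map (fun ch => if d.contains (String.mk [ch]) = true ∧ k = String.mk [ch] then (-1:Int) else 0)).sum := by
      conv_rhs => rw [← List.zipIdx_map_fst 0 (xs ++ [x]), List.map_map]
      rfl
    have hcong1 : ((xs ++ [x]).map (fun ch => if d.contains (String.mk [ch]) = true ∧ k = String.mk [ch] then (-1:Int) else 0))
        = ((xs ++ [x]).map (fun ch => if k = String.mk [ch] then (-1:Int) else 0)) := by
      apply List.map_congr_left; intro ch _
      by_cases h : k = String.mk [ch]
      · rw [← h]; simp [hk]
      · simp [h]
    have hzip : ((xs ++ [x]).zipIdx : List (Char × Nat)) = xs.zipIdx ++ [(x, xs.length)] := by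
      rw [List.zipIdx_append]; simp
    have hpart2 : (((xs ++ [x]).zipIdx).map (fun p => if p.2 < (xs ++ [x]).length - 1 then (if d.contains (String.mk [p.1]) = true ∧ d.contains k = true ∧ k ≠ String.mk [p.1] then (1:Int) else 0) else 0)).sum
        = (xs.map (fun ch => if d.contains (String.mk [ch]) = true ∧ d.contains k = true ∧ k ≠ String.mk [ch] then (1:Int) else 0)).sum := by
      rw [hzip, List.map_append, List.sum_append, hn1]
      rw [pvSum_zipIdx_lt (fun ch => if d.contains (String.mk [ch]) = true ∧ d.contains k = true ∧ k ≠ String.mk [ch] then (1:Int) else 0) xs 0 xs.length (by omega)]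
      simp
    rw [hpart1, hcong1, hpart2]
    have hcong2 : (xs.map (fun ch => if d.contains (String.mk [ch]) = true ∧ d.contains k = true ∧ k ≠ String.mk [ch] then (1:Int) else 0))
        = (xs.map (fun ch => (if d.contains (String.mk [ch]) = true then (1:Int) else 0) - (if k = String.mk [ch] then (1:Int) else 0))) := by
      apply List.map_congr_left; intro ch _
      by_cases h : k = String.mk [ch]
      · rw [← h]; simp [hk]
      · by_cases h2 : d.contains (String.mk [ch]) = true <;> simp [h, h2, hk]
    rw [hcong2, pvSum_map_sub]
    rw [pvSum_map_ite_neg (fun ch => k = String.mk [ch]) (xs ++ [x])]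
    rw [pvSum_map_ite_one (fun ch => d.contains (String.mk [ch]) = true) xs]
    rw [pvSum_map_ite_one (fun ch => k = String.mk [ch]) xs]
    have hcd : ∀ (l : List Char), ((l.map (fun ch => String.mk [ch])).countP (fun t => d.contains t)) = l.countP (fun ch => d.contains (String.mk [ch])) := by
      intro l; rw [List.countP_map]; rfl
    have hck : ∀ (l : List Char), ((l.map (fun ch => String.mk [ch])).count k) = l.countP (fun ch => decide (k = String.mk [ch])) := by
      intro l; rw [List.count, List.countP_map]
      apply List.countP_congr
      intro ch _
      simp [Bool.beq_eq_decide_eq, eq_comm]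
    simp only [pvVal, List.getLast?_concat, hcd, hck]
    simp only [List.countP_append, List.countP_singleton]
    by_cases h1 : d.contains (String.mk [x]) = true <;> by_cases h2 : k = String.mk [x] <;>
      simp [h1, h2] <;> push_cast <;> ring

-- The Python 'max(values)' as the running-max/option fold B performs over the same keys.
lemma pvMaxFold (f : String → Int) : ∀ (t : List String) (a : Int),
    t.foldl (fun (b : Option Int) k => match b with
      | none => some (f k)
      | some m => if f k > m then some (f k) else some m) (some a)
    = some ((t.map f).foldl max a) := by
  intro t
  induction t with
  | nil => intro a; simp
  | cons x t ih =>
    intro a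
    rw [List.foldl_cons, List.map_cons, List.foldl_cons]
    have : (match some a with
      | none => some (f x)
      | some m => if f x > m then some (f x) else some m) = some (max a (f x)) := by
      by_cases h : f x > a
      · simp [h, max_eq_right (le_of_lt h)]
      · simp [h, max_eq_left (not_lt.mp h)]
    rw [this, ih]

lemma pvMaxMatch (f : String → Int) (ks : List String) :
    (match PySem.List.max? (ks.map f) (fun x => x) with | some m => m | none => 0)
    = (match ks.foldl (fun (b : Option Int) k => match b with
        | none => some (f k)
        | some m => if f k > m then some (f k) else some m) none with | some m => m | none => 0) := by
  cases ks with
  | nil => simp [PySem.List.max?]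
  | cons x t =>
    rw [List.map_cons, PySem.List.max?_id_cons, List.foldl_cons]
    show _ = (match t.foldl _ (some (f x)) with | some m => m | none => 0)
    rw [pvMaxFold]

-- Python str.count with a single-character needle is the character count.
lemma pvCountGo_single (c : Char) : ∀ (fuel : Nat) (l : List Char) (acc : Nat), l.length ≤ fuel →
    PySem.Chars.count.go [c] fuel l acc = acc + l.count c := by
  intro fuel
  induction fuel with
  | zero =>
    intro l acc h
    have : l = [] := List.eq_nil_of_length_eq_zero (Nat.le_zero.mp h)
    subst this
    simp [PySem.Chars.count.go]
  | succ fuel ih =>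
    intro l acc h
    cases l with
    | nil => simp [PySem.Chars.count.go]
    | cons x t =>
      rw [PySem.Chars.count.go]
      by_cases hx : c = x
      · subst hx
        have hpre : [c].isPrefixOf (c :: t) = true := by simp [List.isPrefixOf]
        simp only [hpre, if_true]
        have hdrop : List.drop [c].length (c :: t) = t := by simp
        rw [hdrop, ih t (acc + 1) (by simpa using h)]
        simp [List.count_cons]
        omega
      · have hpre : [c].isPrefixOf (x :: t) = false := by
          simp [List.isPrefixOf]
          exact fun hc => hx (by simpa [eq_comm] using hc)
        simp only [hpre]
        rw [if_neg (by simp)]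
        rw [ih t acc (by simpa using h)]
        simp [List.count_cons]
        intro hxc
        exact absurd hxc.symm hx

lemma pvToList_mk (l : List Char) : (String.mk l).toList = l :=
  ((fun {l} {s} => (String.ofList_eq (l := l) (s := s)).mp) rfl).symm

lemma pvStrCount_single (s : String) (c : Char) :
    PySem.Str.count s (String.mk [c]) = s.toList.count c := by
  have h : PySem.Str.count s (String.mk [c]) = PySem.Chars.count s.toList [c] := by
    rw [PySem.Str.count, pvToList_mk]
  rw [h]
  unfold PySem.Chars.count
  simp only [List.isEmpty_cons, if_neg Bool.false_ne_true]
  rw [pvCountGo_single c s.toList.length s.toList 0 (le_refl _)]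
  simp

-- str.count of a consumed character equals its count among the 1-character strings of sConsumed.
lemma pvCount_mem (s : String) (t : String) (ht : t ∈ s.toList.map (fun ch => String.mk [ch])) :
    ((PySem.Str.count s t : Nat) : Int) = (((s.toList.map (fun ch => String.mk [ch])).count t : Nat) : Int) := by
  obtain ⟨c0, _, rfl⟩ := List.mem_map.mp ht
  rw [pvStrCount_single]
  have hcount : (s.toList.map (fun ch => String.mk [ch])).count (String.mk [c0]) = s.toList.count c0 := by
    rw [List.count, List.countP_map, List.count]
    apply List.countP_congr
    intro ch _
    have : (String.mk [ch] = String.mk [c0]) ↔ (ch = c0) := by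
      constructor
      · intro h
        have := congrArg String.toList h
        simpa [pvToList_mk] using this
      · intro h; rw [h]
    simp [Bool.beq_eq_decide_eq, this]
  rw [hcount]

-- B's port computes exactly the option-max of pvVal over the keys.
lemma pvAlt_eq (dFruits : List (String × Int)) (sConsumed : String) :
    nfruits_alt dFruits sConsumed =
      (match (PySem.Dict.ofList dFruits).keys.foldl (fun (b : Option Int) k => match b with
          | none => some (pvVal (PySem.Dict.ofList dFruits) sConsumed.toList k)
          | some m => if pvVal (PySem.Dict.ofList dFruits) sConsumed.toList k > m then some (pvVal (PySem.Dict.ofList dFruits) sConsumed.toList k) else some m) none with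
        | some m => m
        | none => 0) := by
  have hnd := PySem.Dict.nodup_keys_ofList dFruits
  set d := PySem.Dict.ofList dFruits with hd
  set cs := sConsumed.toList with hcs
  set ms : List String := cs.map (fun ch => String.mk [ch]) with hms
  set fl : List String := (PySem.Set.ofList ms).filter (fun t => decide (d.contains t = true)) with hfl
  have hflnd : fl.Nodup := (PySem.Set.nodup_ofList ms).filter _
  have hflmem : ∀ t ∈ fl, t ∈ ms ∧ d.contains t = true := by
    intro t ht
    rcases List.mem_filter.mp ht with ⟨h1, h2⟩
    exact ⟨(PySem.Set.mem_ofList ms t).mp h1, by simpa using h2⟩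
  set cnts : PySem.Dict String Int := (PySem.Set.ofList ms).foldl (fun (m : PySem.Dict String Int) t =>
      if d.contains t then m.insert t ((PySem.Str.count sConsumed t : Nat) : Int) else m) PySem.Dict.empty with hcnts
  have hitems : cnts.items = fl.map (fun t => (t, (((ms.count t : Nat)) : Int))) := by
    rw [hcnts, PySem.List.foldl_ite_eq_foldl_filter (fun t => d.contains t = true)
      (fun (m : PySem.Dict String Int) t => m.insert t ((PySem.Str.count sConsumed t : Nat) : Int)), ← hfl]
    rw [PySem.Dict.items_foldl_insert_fresh fl (fun x => x)
      (fun t => ((PySem.Str.count sConsumed t : Nat) : Int))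
      PySem.Dict.empty (fun a _ => PySem.Dict.contains_empty a) (by simpa using hflnd)]
    rw [show (PySem.Dict.empty : PySem.Dict String Int).items = [] from rfl, List.nil_append]
    exact List.map_congr_left (fun t ht => by
      rw [pvCount_mem sConsumed t (hms ▸ (hflmem t ht).1)])
  have hkeysc : cnts.keys = fl := by
    simp only [PySem.Dict.keys, hitems, List.map_map]
    exact (List.map_congr_left (fun a _ => rfl)).trans (List.map_id fl)
  have hgetD : ∀ k ∈ d.keys, cnts.getD k 0 = ((ms.count k : Nat) : Int) := by
    intro k hk
    by_cases hm : k ∈ ms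
    · have hkfl : k ∈ fl := by
        rw [hfl]
        exact List.mem_filter.mpr ⟨(PySem.Set.mem_ofList ms k).mpr hm,
          by simpa using (PySem.Dict.contains_iff_mem_keys d k).mpr hk⟩
      exact PySem.Dict.getD_of_mem_items _
        (by rw [hitems]; exact List.mem_map_of_mem hkfl) (by rw [hkeysc]; exact hflnd) 0
    · have hnc : cnts.contains k = false := by
        rw [PySem.Dict.contains_eq_decide_mem_keys, hkeysc]
        simp only [decide_eq_false_iff_not]
        intro hkfl
        exact hm (hflmem k hkfl).1
      rw [PySem.Dict.getD_of_not_contains _ _ hnc]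
      rw [List.count_eq_zero.mpr hm]
      simp
  have hsum : (cnts.values.foldl (fun (a : Int) c => a + c) 0)
      = ((ms.countP (fun t => d.contains t) : Nat) : Int) := by
    rw [PySem.List.foldl_add _ (fun c => c), zero_add]
    simp only [PySem.Dict.values, hitems, List.map_map]
    have hperm : (PySem.Set.ofList ms).Perm ms.dedup :=
      (List.perm_ext_iff_of_nodup (PySem.Set.nodup_ofList ms) (List.nodup_dedup ms)).mpr
        (fun a => by rw [PySem.Set.mem_ofList, List.mem_dedup])
    have hperm2 := ((hperm.filter (fun t => decide (d.contains t = true))).map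
      ((fun c : Int => c) ∘ (fun p : String × Int => p.2) ∘ fun t => (t, ((ms.count t : Nat) : Int)))).sum_eq
    rw [hfl, hperm2]
    have hcast : (List.map ((fun c : Int => c) ∘ (fun p : String × Int => p.2) ∘ fun t => (t, ((ms.count t : Nat) : Int)))
          (ms.dedup.filter (fun t => decide (d.contains t = true))))
        = List.map (Nat.cast : Nat → Int) (List.map (fun t => List.count t ms)
            (ms.dedup.filter (fun t => d.contains t))) := by
      rw [List.map_map]
      congr 1
      apply List.filter_congr
      intro a _
      simp
    rw [hcast, ← Nat.cast_list_sum]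
    congr 1
    have := List.sum_map_count_dedup_filter_eq_countP (fun t => d.contains t) ms
    simpa using this
  have hbody0 : nfruits_alt dFruits sConsumed =
      (match d.items.foldl (fun (b : Option Int) p =>
          let c := cnts.getD p.1 0
          let bb := c - (if some p.1 = (cs.getLast?).map (fun ch => String.mk [ch]) then (1:Int) else 0)
          let val := p.2 + ((cnts.values.foldl (fun (a : Int) c => a + c) 0)
              - (if (match (cs.getLast?).map (fun ch => String.mk [ch]) with
                     | some l => d.contains l
                     | none => false) then (1:Int) else 0)) - c - bb
          match b with
          | none => some val
          | some m => if val > m then some val else some m) none with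
        | some m => m
        | none => 0) := rfl
  rw [hbody0]
  simp only [hsum]
  rw [PySem.Dict.items_eq_map_keys d hnd 0, List.foldl_map]
  have hfun : ∀ (b : Option Int), ∀ k ∈ d.keys,
      (fun (b : Option Int) (p : String × Int) =>
        let c := cnts.getD p.1 0
        let bb := c - (if some p.1 = (cs.getLast?).map (fun ch => String.mk [ch]) then (1:Int) else 0)
        let val := p.2 + (((ms.countP (fun t => d.contains t) : Nat) : Int)
            - (if (match (cs.getLast?).map (fun ch => String.mk [ch]) with
                   | some l => d.contains l
                   | none => false) then (1:Int) else 0)) - c - bb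
        match b with
        | none => some val
        | some m => if val > m then some val else some m) b (k, d.getD k 0)
      = (fun (b : Option Int) (k : String) => match b with
        | none => some (pvVal d cs k)
        | some m => if pvVal d cs k > m then some (pvVal d cs k) else some m) b k := by
    intro b k hk
    have hv : d.getD k 0 + (((ms.countP (fun t => d.contains t) : Nat) : Int)
          - (if (match (cs.getLast?).map (fun ch => String.mk [ch]) with
                 | some l => d.contains l
                 | none => false) then (1:Int) else 0))
        - cnts.getD k 0
        - (cnts.getD k 0 - (if some k = (cs.getLast?).map (fun ch => String.mk [ch]) then (1:Int) else 0))
        = pvVal d cs k := by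
      rw [hgetD k hk]
      unfold pvVal
      rw [← hms]
      rcases hlast : cs.getLast? with _ | x
      · simp
      · simp only [Option.map_some]
        by_cases h1 : d.contains (String.mk [x]) = true <;>
          by_cases h2 : k = String.mk [x] <;>
            simp [h1, h2] <;> ring
    simp only []
    rw [hv]
  rw [PySem.List.foldl_congr_mem d.keys _ _ none (fun b k hkmem => hfun b k hkmem)]

-- ===== VERDICT (by name: the statement is the Claim_ definition above) =====
theorem nfruits_spec : Claim_equal_nfruits := by
  unfold Claim_equal_nfruits
  intro dFruits sConsumed _ _
  unfold Spec_nfruits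
  rw [pvAlt_eq]
  have hnd := PySem.Dict.nodup_keys_ofList dFruits
  set d := PySem.Dict.ofList dFruits with hd
  set cs := sConsumed.toList with hcs
  have hA : nfruits dFruits sConsumed
      = (match PySem.List.max? (((cs.zipIdx).foldl (nfruitsStep cs.length) d)).values (fun x => x) with
         | some m => m | none => 0) := rfl
  rw [hA]
  obtain ⟨hkeys, hgetD⟩ := pvOuterA cs.length (cs.zipIdx) d hnd
  have hndfin : ((cs.zipIdx).foldl (nfruitsStep cs.length) d).keys.Nodup := by rw [hkeys]; exact hnd
  rw [PySem.Dict.values_eq_map_keys _ hndfin 0, hkeys]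
  have hmap : d.keys.map (fun k => ((cs.zipIdx).foldl (nfruitsStep cs.length) d).getD k 0)
      = d.keys.map (pvVal d cs) := by
    apply List.map_congr_left
    intro k hkmem
    exact pvKey d hnd cs k ((PySem.Dict.contains_iff_mem_keys d k).mpr hkmem)
  rw [hmap, pvMaxMatch]
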